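-- pv_equiv track=rewrite | github.com/happyAnger6/notes | 数据结构与算法/动态规则/p1723.py | minimum_time_required
-- ===== SOURCE A (Python) =====
-- def minimum_time_required(jobs, k):
--     n = len(jobs)
--     dp = [0 for _ in range(1<<n)]
--     for i in range(1<<n):
--         end = n - 1
--         pos = i
--         while i != 0:
--             if i & 1 == 1:
--                 dp[pos] += jobs[end]
--             i >>= 1
--             end -= 1
--
--     return dp
-- ===== SOURCE B (Python) =====
-- def minimum_time_required(jobs, k):
--     dp = [0]
--     for job in reversed(jobs):
--         dp += [x + job for x in dp]
--     return dp
-- ===== Notes on version B (the rewrite author's own statement) =====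
-- stated objective: faster
-- what changed: A scans the bits of every mask (O(2^n * n)); B builds the subset-sum table by doubling it once per job (dp += [x + job for x in dp]), O(2^n); intended as faster, measured 30x at n=16 (neither finishes at n=64, the output itself has 2^n entries).
import Mathlib
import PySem

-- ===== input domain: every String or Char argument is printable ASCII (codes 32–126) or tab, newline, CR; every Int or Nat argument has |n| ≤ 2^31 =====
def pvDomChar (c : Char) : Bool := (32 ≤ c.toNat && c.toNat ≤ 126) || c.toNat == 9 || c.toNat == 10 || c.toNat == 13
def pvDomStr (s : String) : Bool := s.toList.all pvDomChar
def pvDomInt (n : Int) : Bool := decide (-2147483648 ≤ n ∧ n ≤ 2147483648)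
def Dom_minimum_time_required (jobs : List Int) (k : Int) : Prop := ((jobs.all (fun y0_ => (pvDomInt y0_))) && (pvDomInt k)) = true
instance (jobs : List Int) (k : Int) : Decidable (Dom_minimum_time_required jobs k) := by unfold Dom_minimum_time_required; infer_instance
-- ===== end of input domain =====

-- B replaces A's per-mask bit-scan by doubling the table once per job; intended as faster (O(2^n) vs O(2^n*n)); measured 30x at n=16, neither finishes at n=64 (the output has 2^n entries).

-- ===== PORT A =====
-- the inner 'while i != 0' loop of A: pos is fixed, m is the remaining bits of i, e is 'end'
def mtrWhile (jobs : List Int) (dp : List Int) (pos : Nat) (m : Nat) (e : Int) : List Int :=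
  if m = 0 then dp
  else
    let dp' := if m % 2 = 1 then dp.set pos (dp.getD pos 0 + (PySem.List.pyGet? jobs e).getD 0) else dp
    mtrWhile jobs dp' pos (m / 2) (e - 1)
  termination_by m
  decreasing_by exact Nat.div_lt_self (Nat.pos_of_ne_zero (by assumption)) (by omega)

def minimum_time_required (jobs : List Int) (k : Int) : List Int :=
  let n := jobs.length
  (List.range (2 ^ n)).foldl (fun dp i => mtrWhile jobs dp i i ((n : Int) - 1)) (List.replicate (2 ^ n) 0)

-- ===== PORT B =====
def minimum_time_required_alt (jobs : List Int) (k : Int) : List Int :=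
  jobs.reverse.foldl (fun dp job => dp ++ dp.map (fun x => x + job)) [0]

-- ===== PRECONDITION & SPEC =====
def Spec_minimum_time_required (jobs : List Int) (k : Int) (out : List Int) : Prop := out = minimum_time_required_alt jobs k
instance (jobs : List Int) (k : Int) (out : List Int) : Decidable (Spec_minimum_time_required jobs k out) := by unfold Spec_minimum_time_required; infer_instance

-- ===== CLAIM (what is proved, stated in full; the proofs are below) =====
def Claim_equal_minimum_time_required : Prop := ∀ (jobs : List Int) (k : Int), Dom_minimum_time_required jobs k → Spec_minimum_time_required jobs k (minimum_time_required jobs k)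

-- ===== LEMMAS AND PROOFS =====

-- value of jobs[e] in A's read (default 0 never used inside the claim's reachable indices)
def Jget (jobs : List Int) (e : Int) : Int := (PySem.List.pyGet? jobs e).getD 0

-- the total amount the while loop adds to dp[pos]: sum of jobs[e - p] over set bits p of m
def gsum (jobs : List Int) (m : Nat) (e : Int) : Int :=
  if m = 0 then 0
  else (if m % 2 = 1 then Jget jobs e else 0) + gsum jobs (m / 2) (e - 1)
  termination_by m
  decreasing_by exact Nat.div_lt_self (Nat.pos_of_ne_zero (by assumption)) (by omega)

theorem gsum_zero (jobs : List Int) (e : Int) : gsum jobs 0 e = 0 := by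
  rw [gsum]; simp

theorem gsum_ne (jobs : List Int) (m : Nat) (e : Int) (hm : m ≠ 0) :
    gsum jobs m e = (if m % 2 = 1 then Jget jobs e else 0) + gsum jobs (m / 2) (e - 1) := by
  conv_lhs => rw [gsum]
  simp [hm]

theorem set_getD_self (dp : List Int) (p : Nat) (h : p < dp.length) :
    dp.set p (dp.getD p 0) = dp := by
  apply List.ext_getElem (by simp)
  intro i h1 h2
  rw [List.getElem_set]
  split_ifs with hip
  · subst hip
    rw [List.getD_eq_getElem dp 0 h]
  · rfl

theorem getD_set_self (dp : List Int) (p : Nat) (a : Int) (h : p < dp.length) :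
    (dp.set p a).getD p 0 = a := by
  rw [List.getD_eq_getElem _ 0 (by simpa using h)]
  simp

theorem mtrWhile_eq_set (jobs : List Int) (m : Nat) :
    ∀ (e : Int) (dp : List Int) (pos : Nat), pos < dp.length →
      mtrWhile jobs dp pos m e = dp.set pos (dp.getD pos 0 + gsum jobs m e) := by
  induction m using Nat.strong_induction_on with
  | _ m ih =>
    intro e dp pos hpos
    rw [mtrWhile]
    by_cases hm : m = 0
    · simp only [hm, gsum_zero, add_zero]
      exact (set_getD_self dp pos hpos).symm
    · have hlt : m / 2 < m := Nat.div_lt_self (Nat.pos_of_ne_zero hm) (by omega)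
      rw [gsum_ne jobs m e hm]
      simp only [if_neg hm]
      by_cases hb : m % 2 = 1
      · simp only [if_pos hb]
        rw [ih (m / 2) hlt (e - 1) _ pos (by simpa using hpos)]
        rw [getD_set_self dp pos _ hpos, List.set_set]
        simp only [Jget]
        congr 1
        ring
      · simp only [if_neg hb]
        rw [ih (m / 2) hlt (e - 1) dp pos hpos]
        congr 1
        ring

-- A's fold characterised: after processing range j, entry i is gsum i for i < j, else 0
theorem foldl_range_char (jobs : List Int) (N : Nat) (e0 : Int) (j : Nat) (hj : j ≤ N) :
    (List.range j).foldl (fun dp i => mtrWhile jobs dp i i e0) (List.replicate N 0) =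
      (List.range N).map (fun i => if i < j then gsum jobs i e0 else 0) := by
  induction j with
  | zero =>
    simp only [List.range_zero, List.foldl_nil]
    apply List.ext_getElem (by simp)
    intro i h1 h2
    simp
  | succ j ih =>
    have hjN : j < N := by omega
    rw [List.range_succ, List.foldl_append, ih (by omega), List.foldl_cons, List.foldl_nil]
    rw [mtrWhile_eq_set jobs j e0 _ j (by simpa using hjN)]
    have hget : ((List.range N).map (fun i => if i < j then gsum jobs i e0 else 0)).getD j 0
        = 0 := by
      rw [List.getD_eq_getElem _ 0 (by simpa using hjN)]
      simp
    rw [hget]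
    apply List.ext_getElem (by simp)
    intro i h1 h2
    simp only [List.length_map, List.length_range] at h1 h2
    rw [List.getElem_set]
    simp only [List.getElem_map, List.getElem_range]
    split_ifs with hA hB hB <;> first | rfl | omega | (subst hA; simp)

theorem A_char (jobs : List Int) (k : Int) :
    minimum_time_required jobs k =
      (List.range (2 ^ jobs.length)).map (fun i => gsum jobs i ((jobs.length : Int) - 1)) := by
  unfold minimum_time_required
  rw [foldl_range_char jobs (2 ^ jobs.length) _ (2 ^ jobs.length) (le_refl _)]
  apply List.map_congr_left
  intro i hi
  simp only [List.mem_range] at hi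
  simp [hi]

theorem Jget_cons_succ (x : Int) (l : List Int) (e : Nat) :
    Jget (x :: l) ((e : Int) + 1) = Jget l e := by
  unfold Jget
  rw [PySem.List.pyGet?_cons_succ]

-- bits of m < 2^n address only the tail: gsum over (x::l) from index n equals gsum over l from n-1
theorem gsum_cons (x : Int) (l : List Int) (n : Nat) :
    ∀ m : Nat, m < 2 ^ n → gsum (x :: l) m (n : Int) = gsum l m ((n : Int) - 1) := by
  induction n with
  | zero =>
    intro m hm
    have : m = 0 := by simpa using hm
    subst this
    rw [gsum_zero, gsum_zero]
  | succ n ih =>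
    intro m hm
    by_cases hm0 : m = 0
    · subst hm0
      rw [gsum_zero, gsum_zero]
    · have h2 : (((n : Nat) + 1 : Nat) : Int) = (n : Int) + 1 := by push_cast; ring
      rw [h2, gsum_ne _ m _ hm0, gsum_ne _ m _ hm0]
      have h1 : ((n : Int) + 1) - 1 = (n : Int) := by ring
      rw [h1]
      have hrec : gsum (x :: l) (m / 2) (n : Int) = gsum l (m / 2) ((n : Int) - 1) := by
        apply ih
        have : 2 ^ (n + 1) = 2 ^ n * 2 := by ring
        omega
      rw [hrec, Jget_cons_succ x l n]

-- adding the high bit 2^p adds jobs[e - p]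
theorem gsum_high (L : List Int) (p : Nat) :
    ∀ (m : Nat) (e : Int), m < 2 ^ p →
      gsum L (m + 2 ^ p) e = gsum L m e + Jget L (e - (p : Int)) := by
  induction p with
  | zero =>
    intro m e hm
    have : m = 0 := by simpa using hm
    subst this
    have h01 : (0 : Nat) + 2 ^ 0 = 1 := by norm_num
    rw [h01, gsum_ne L 1 e (by omega), gsum_zero, gsum_zero]
    simp
  | succ p ih =>
    intro m e hm
    have ht : 2 ^ (p + 1) = 2 ^ p * 2 := by ring
    have h2p : 0 < 2 ^ (p + 1) := Nat.two_pow_pos _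
    have hne : m + 2 ^ (p + 1) ≠ 0 := by omega
    have hmod : (m + 2 ^ (p + 1)) % 2 = m % 2 := by omega
    have hdiv : (m + 2 ^ (p + 1)) / 2 = m / 2 + 2 ^ p := by omega
    rw [gsum_ne L _ e hne, hmod, hdiv]
    rw [ih (m / 2) (e - 1) (by omega)]
    have harg : e - 1 - (p : Int) = e - (((p : Nat) + 1 : Nat) : Int) := by push_cast; ring
    rw [harg]
    by_cases hm0 : m = 0
    · subst hm0
      simp only [Nat.zero_mod, Nat.zero_div, gsum_zero]
      norm_num
    · rw [gsum_ne L m e hm0]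
      ring

theorem B_foldr (jobs : List Int) (k : Int) :
    minimum_time_required_alt jobs k =
      jobs.foldr (fun job dp => dp ++ dp.map (fun x => x + job)) [0] := by
  unfold minimum_time_required_alt
  rw [List.foldl_reverse]

theorem main_eq (jobs : List Int) (k : Int) :
    minimum_time_required jobs k = minimum_time_required_alt jobs k := by
  rw [A_char jobs k, B_foldr jobs k]
  induction jobs with
  | nil => simp [gsum_zero]
  | cons x l ih =>
    have hsplit : 2 ^ (x :: l).length = 2 ^ l.length + 2 ^ l.length := by
      simp [List.length_cons]; ring
    rw [hsplit, List.range_add, List.map_append, List.foldr_cons]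
    have hlen : ((x :: l).length : Int) - 1 = (l.length : Int) := by
      simp [List.length_cons]
    congr 1
    · rw [← ih]
      apply List.map_congr_left
      intro i hi
      simp only [List.mem_range] at hi
      rw [hlen]
      exact gsum_cons x l l.length i hi
    · rw [← ih, List.map_map, List.map_map]
      apply List.map_congr_left
      intro i hi
      simp only [List.mem_range] at hi
      simp only [Function.comp]
      rw [hlen]
      have hadd : 2 ^ l.length + i = i + 2 ^ l.length := by ring
      rw [hadd, gsum_high (x :: l) l.length i _ hi, gsum_cons x l l.length i hi]
      have h0 : (l.length : Int) - (l.length : Int) = 0 := by ring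
      rw [h0]
      have hx : Jget (x :: l) 0 = x := by
        unfold Jget
        rw [PySem.List.pyGet?_zero_cons]
        rfl
      rw [hx]

-- ===== VERDICT (by name: the statement is the Claim_ definition above) =====
theorem minimum_time_required_spec : Claim_equal_minimum_time_required := by
  intro jobs k _
  unfold Spec_minimum_time_required
  exact main_eq jobs k
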